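-- pv_equiv track=rewrite | github.com/Geleta116/Competitive-Programming. | 2460-apply-operations-to-an-array/2460-apply-operations-to-an-array.py | applyOperations
-- ===== SOURCE A (Python) =====
-- from typing import List
--
-- def applyOperations(nums: List[int]) -> List[int]:
--     for i in range(len(nums)-1):
--         if nums[i]==nums[i+1]:
--             nums[i]*=2
--             nums[i+1] = 0
--         else:
--             continue
--     i = 0
--     while i<len(nums)-1:
--         j = i+1
--         while j<len(nums):
--             if nums[i] == 0 and nums[j]!=0:
--                 nums[i],nums[j]=nums[j],nums[i]
--                 i+=1
--                 j+=1
--             else: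
--                 j+=1
--         i+=1
--
--     return nums
-- ===== SOURCE B (Python) =====
-- from typing import List
--
-- def applyOperations(nums: List[int]) -> List[int]:
--     # One left-to-right pass: merge an adjacent equal non-zero pair on the fly,
--     # collect non-zero results, then pad with zeros. O(n) instead of A's O(n^2).
--     n = len(nums)
--     out = []
--     i = 0
--     while i < n:
--         if i + 1 < n and nums[i] != 0 and nums[i] == nums[i + 1]:
--             out.append(2 * nums[i])
--             i += 2
--         else:
--             if nums[i] != 0:
--                 out.append(nums[i])
--             i += 1
--     out.extend([0] * (n - len(out)))
--     return out
-- ===== Notes on version B (the rewrite author's own statement) =====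
-- stated objective: faster
-- what changed: Replaced A's in-place merge pass plus quadratic nested swap loops that push zeros right by a single left-to-right pass that merges adjacent equal non-zero pairs on the fly, appends the non-zero results, and pads with zeros.
import Mathlib
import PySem

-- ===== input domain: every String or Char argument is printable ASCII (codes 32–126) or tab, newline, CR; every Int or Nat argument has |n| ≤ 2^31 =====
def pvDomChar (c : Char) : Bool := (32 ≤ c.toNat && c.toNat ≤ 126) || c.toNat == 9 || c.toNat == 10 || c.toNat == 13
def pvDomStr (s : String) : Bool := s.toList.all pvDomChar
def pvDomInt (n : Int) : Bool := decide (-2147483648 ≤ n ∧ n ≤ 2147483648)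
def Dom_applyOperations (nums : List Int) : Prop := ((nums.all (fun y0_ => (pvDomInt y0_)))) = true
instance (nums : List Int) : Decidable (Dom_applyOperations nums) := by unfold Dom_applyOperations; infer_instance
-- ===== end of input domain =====

-- B replaces A's in-place merge pass + quadratic nested swap loops by one linear
-- merge-and-compact pass; equivalence is about the RETURN value only (Python A
-- mutates its argument in place, B does not).


-- ===== PORT A =====
-- All list indices below are Nat and provably in range wherever Python reads
-- or writes them, so List.getD / List.set are exact for nums[i] / nums[i] = v.
-- Each while loop is ported with an explicit fuel counter started at a value
-- that dominates its iteration count (inner: len - j ≤ len; outer: i strictly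
-- increases, so ≤ len rounds), so the fuel-0 branch is never taken from the
-- call sites below.

-- inner 'while j < len(nums)' loop of A's second phase; returns (nums, i)
def innerA (fuel : Nat) (l : List Int) (i j : Nat) : List Int × Nat :=
  match fuel with
  | 0 => (l, i)
  | fuel+1 =>
    if j < l.length then
      if l.getD i 0 = 0 ∧ l.getD j 0 ≠ 0 then
        -- nums[i], nums[j] = nums[j], nums[i]  (RHS read before both writes)
        let vi := l.getD i 0
        let vj := l.getD j 0
        innerA fuel ((l.set i vj).set j vi) (i+1) (j+1)
      else
        innerA fuel l i (j+1)
    else (l, i)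

-- outer 'while i < len(nums)-1' loop of A's second phase
def outerA (fuel : Nat) (l : List Int) (i : Nat) : List Int :=
  match fuel with
  | 0 => l
  | fuel+1 =>
    if i < l.length - 1 then
      let r := innerA l.length l i (i+1)
      outerA fuel r.1 (r.2 + 1)
    else l

def applyOperations (nums : List Int) : List Int :=
  -- first phase: for i in range(len(nums)-1): merge equal neighbours in place
  let nums1 := (List.range (nums.length - 1)).foldl
    (fun a i => if a.getD i 0 = a.getD (i+1) 0
                then (a.set i (2 * a.getD i 0)).set (i+1) 0
                else a) nums
  outerA nums1.length nums1 0

-- ===== PORT B =====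
-- the single while-loop of Source B, building 'out' (fuel dominates: i increases
-- by 1 or 2 every round, so ≤ n rounds)
def altGo (fuel : Nat) (l : List Int) (n i : Nat) : List Int :=
  match fuel with
  | 0 => []
  | fuel+1 =>
    if i < n then
      if i + 1 < n ∧ l.getD i 0 ≠ 0 ∧ l.getD i 0 = l.getD (i+1) 0 then
        2 * l.getD i 0 :: altGo fuel l n (i+2)
      else if l.getD i 0 ≠ 0 then
        l.getD i 0 :: altGo fuel l n (i+1)
      else
        altGo fuel l n (i+1)
    else []

def applyOperations_alt (nums : List Int) : List Int :=
  let out := altGo nums.length nums nums.length 0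
  out ++ List.replicate (nums.length - out.length) 0

-- ===== PRECONDITION & SPEC =====
def Spec_applyOperations (nums : List Int) (out : List Int) : Prop := out = applyOperations_alt nums
instance (nums : List Int) (out : List Int) : Decidable (Spec_applyOperations nums out) := by unfold Spec_applyOperations; infer_instance

-- ===== CLAIM (what is proved, stated in full; the proofs are below) =====
def Claim_equal_applyOperations : Prop := ∀ (nums : List Int), Dom_applyOperations nums → Spec_applyOperations nums (applyOperations nums)

-- ===== LEMMAS AND PROOFS =====

-- non-zero test, as Source B's 'x != 0'
def nz : Int → Bool := fun x => x != 0

-- structural characterisation of A's first (merge) phase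
def mSpec : List Int → List Int
  | [] => []
  | [x] => [x]
  | x :: y :: t => if x = y then 2*x :: mSpec (0 :: t) else x :: mSpec (y :: t)
termination_by l => l.length

-- structural characterisation of B's single pass (before zero padding)
def goS : List Int → List Int
  | [] => []
  | [x] => if x ≠ 0 then [x] else []
  | x :: y :: t =>
      if x ≠ 0 ∧ x = y then 2*x :: goS t
      else if x ≠ 0 then x :: goS (y :: t)
      else goS (y :: t)
termination_by l => l.length

-- common target: stable compaction (non-zeros in order, then padding zeros)
def Fc (l : List Int) : List Int :=
  l.filter nz ++ List.replicate (l.length - (l.filter nz).length) 0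

theorem mSpec_length (l : List Int) : (mSpec l).length = l.length := by
  fun_induction mSpec l <;> simp_all

theorem filter_mSpec_zero_cons (t : List Int) :
    (mSpec (0 :: t)).filter nz = (mSpec t).filter nz := by
  match t with
  | [] => simp [mSpec, nz]
  | z :: t' =>
    by_cases hz : z = 0
    · subst hz; simp [mSpec, nz]
    · rw [show mSpec (0 :: z :: t') = 0 :: mSpec (z :: t') by
        simp [mSpec, if_neg (show ¬(0:Int) = z from fun h => hz h.symm)]]
      simp [nz]

theorem goS_eq_filter_mSpec (l : List Int) : goS l = (mSpec l).filter nz := by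
  fun_induction goS l
  case case1 => simp [mSpec]
  case case2 x hx => simp [mSpec, nz, hx]
  case case3 x hx =>
    have : x = 0 := by by_cases h : x = 0; exact h; exact absurd h hx
    subst this; simp [mSpec, nz]
  case case4 x y t h ih =>
    obtain ⟨hx, hxy⟩ := h
    subst hxy
    have h2 : (2*x : Int) ≠ 0 := by omega
    simp [mSpec, nz, h2, filter_mSpec_zero_cons, ih]
  case case5 x y t h1 h2 ih =>
    have hxy : x ≠ y := fun he => h1 ⟨h2, he⟩
    simp [mSpec, hxy, nz, h2, ih]
  case case6 x y t h1 h2 ih =>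
    have hx : x = 0 := by by_cases h : x = 0; exact h; exact absurd h h2
    subst hx
    by_cases hy : y = 0
    · subst hy; rw [ih]; simp [mSpec, nz]
    · rw [show mSpec (0 :: y :: t) = 0 :: mSpec (y :: t) by
        simp [mSpec, if_neg (show ¬(0:Int) = y from fun h => hy h.symm)]]
      simp [nz, ih]

-- the body of A's first-phase for-loop
def step : List Int → Nat → List Int := fun a i =>
  if a.getD i 0 = a.getD (i+1) 0 then (a.set i (2 * a.getD i 0)).set (i+1) 0 else a

theorem step_cons (a : Int) (l : List Int) (k : Nat) :
    step (a :: l) (k+1) = a :: step l k := by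
  simp only [step, List.getD_cons_succ, List.set_cons_succ]
  split <;> rfl

theorem foldl_step_shift (r : List Nat) (a : Int) (l : List Int) :
    (r.map Nat.succ).foldl step (a :: l) = a :: r.foldl step l := by
  induction r generalizing a l with
  | nil => rfl
  | cons k r ih => simp only [List.map_cons, List.foldl_cons, step_cons]; exact ih a (step l k)

theorem phase1_eq_mSpec (l : List Int) :
    (List.range (l.length - 1)).foldl
      (fun a i => if a.getD i 0 = a.getD (i+1) 0
                  then (a.set i (2 * a.getD i 0)).set (i+1) 0
                  else a) l = mSpec l := by
  suffices h : (List.range (l.length - 1)).foldl step l = mSpec l by exact h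
  fun_induction mSpec l with
  | case1 => rfl
  | case2 x => rfl
  | case3 x t ih =>
    have hlen : (x :: x :: t).length - 1 = t.length + 1 := by simp
    rw [hlen, List.range_succ_eq_map, List.foldl_cons]
    have hstep : step (x :: x :: t) 0 = 2*x :: 0 :: t := by
      simp [step, List.getD]
    rw [hstep, foldl_step_shift]
    exact congrArg _ ih
  | case4 x y t hne ih =>
    have hlen : (x :: y :: t).length - 1 = (y :: t).length := by simp
    rw [hlen, show (y :: t).length = (y::t).length - 1 + 1 by simp,
        List.range_succ_eq_map, List.foldl_cons]
    have hstep : step (x :: y :: t) 0 = x :: y :: t := by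
      simp [step, List.getD, hne]
    rw [hstep, foldl_step_shift]
    exact congrArg _ ih

theorem drop_eq_getD_cons (l : List Int) (i : Nat) (h : i < l.length) :
    l.drop i = l.getD i 0 :: l.drop (i+1) := by
  rw [List.getD_eq_getElem l 0 h, List.drop_eq_getElem_cons h]

theorem altGo_eq_goS (l : List Int) : ∀ (fuel i : Nat), l.length ≤ fuel + i →
    altGo fuel l l.length i = goS (l.drop i) := by
  intro fuel
  induction fuel with
  | zero =>
    intro i hle
    rw [altGo, List.drop_eq_nil_of_le (by omega)]
    simp [goS]
  | succ fuel ih =>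
    intro i hle
    rw [altGo]
    by_cases hi : i < l.length
    · rw [if_pos hi]
      by_cases hm : i + 1 < l.length ∧ l.getD i 0 ≠ 0 ∧ l.getD i 0 = l.getD (i+1) 0
      · obtain ⟨hi1, hnz, heq⟩ := hm
        rw [if_pos ⟨hi1, hnz, heq⟩]
        rw [drop_eq_getD_cons l i hi, drop_eq_getD_cons l (i+1) hi1]
        rw [show l.drop (i+1+1) = l.drop (i+2) from rfl]
        rw [show goS (l.getD i 0 :: l.getD (i+1) 0 :: l.drop (i+2))
              = 2 * l.getD i 0 :: goS (l.drop (i+2)) by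
          simp only [goS]
          rw [if_pos (And.intro hnz heq)]]
        rw [ih (i+2) (by omega)]
      · rw [if_neg hm]
        by_cases hnz : l.getD i 0 ≠ 0
        · rw [if_pos hnz]
          rw [drop_eq_getD_cons l i hi]
          by_cases hi1 : i + 1 < l.length
          · rw [drop_eq_getD_cons l (i+1) hi1]
            have hne : l.getD i 0 ≠ l.getD (i+1) 0 := fun he => hm ⟨hi1, hnz, he⟩
            rw [show goS (l.getD i 0 :: l.getD (i+1) 0 :: l.drop (i+1+1))
                  = l.getD i 0 :: goS (l.getD (i+1) 0 :: l.drop (i+1+1)) by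
              simp only [goS]
              rw [if_neg (fun hc => hne hc.2), if_pos hnz]]
            rw [← drop_eq_getD_cons l (i+1) hi1, ih (i+1) (by omega)]
          · have hd : l.drop (i+1) = [] := List.drop_eq_nil_of_le (by omega)
            rw [hd, ih (i+1) (by omega), hd]
            simp only [goS]
            rw [if_pos hnz]
        · rw [if_neg hnz]
          have hz : l.getD i 0 = 0 := by by_cases h : l.getD i 0 = 0; exact h; exact absurd h hnz
          rw [drop_eq_getD_cons l i hi, hz, ih (i+1) (by omega)]
          cases hd : l.drop (i+1) with
          | nil => simp [goS]
          | cons y t => simp [goS]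
    · rw [if_neg hi, List.drop_eq_nil_of_le (by omega)]
      simp [goS]

theorem innerA_noop (l : List Int) (i : Nat) (h : l.getD i 0 ≠ 0) :
    ∀ (fuel j : Nat), innerA fuel l i j = (l, i) := by
  intro fuel
  induction fuel with
  | zero => intro j; rfl
  | succ fuel ih =>
    intro j
    rw [innerA]
    by_cases hj : j < l.length
    · rw [if_pos hj, if_neg (fun hc => h hc.1)]
      exact ih (j+1)
    · rw [if_neg hj]

theorem zeros_shift (n : Nat) (R : List Int) :
    List.replicate n (0:Int) ++ 0 :: R = 0 :: (List.replicate n 0 ++ R) := by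
  induction n with
  | zero => rfl
  | succ k ih => simp [List.replicate_succ, ih]

theorem innerA_main (R : List Int) : ∀ (A : List Int) (m fuel : Nat), 1 ≤ m → R.length ≤ fuel →
    innerA fuel (A ++ List.replicate m 0 ++ R) A.length (A.length + m) =
      (A ++ R.filter nz ++ List.replicate (m + R.length - (R.filter nz).length) 0,
       A.length + (R.filter nz).length) := by
  induction R with
  | nil =>
    intro A m fuel hm _
    match fuel with
    | 0 => simp [innerA]
    | fuel+1 =>
      rw [innerA, if_neg (by simp)]
      simp
  | cons r R' ih =>
    intro A m fuel hm hfuel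
    obtain ⟨m', rfl⟩ : ∃ m', m = m' + 1 := ⟨m - 1, by omega⟩
    obtain ⟨f, rfl⟩ : ∃ f, fuel = f + 1 := ⟨fuel - 1, by simp at hfuel; omega⟩
    have hf' : R'.length ≤ f := by simp at hfuel; omega
    have hL : A ++ List.replicate (m'+1) 0 ++ (r :: R')
        = A ++ (List.replicate (m'+1) 0 ++ (r :: R')) := by
      rw [List.append_assoc]
    have hgi : (A ++ List.replicate (m'+1) 0 ++ (r :: R')).getD A.length 0 = 0 := by
      rw [hL, List.getD_append_right A _ 0 A.length (le_refl _)]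
      simp
    have hgj : (A ++ List.replicate (m'+1) 0 ++ (r :: R')).getD (A.length + (m'+1)) 0 = r := by
      rw [List.getD_append_right _ _ 0 _ (by simp)]
      simp
    by_cases hr : r = 0
    · -- zero at the read pointer: only j advances; fold the zero into the block
      subst hr
      rw [innerA, if_pos (by simp), if_neg (by rw [hgj]; simp)]
      have hsh : A ++ List.replicate (m'+1) 0 ++ (0 :: R')
          = A ++ List.replicate (m'+1+1) 0 ++ R' := by
        rw [show List.replicate (m'+1+1) (0:Int) = List.replicate (m'+1) 0 ++ [0] from
          List.replicate_succ' ..]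
        simp
      have hj1 : A.length + (m'+1) + 1 = A.length + (m'+1+1) := by omega
      rw [hsh, hj1, ih A (m'+1+1) f (by omega) hf']
      simp [nz]
      omega
    · -- non-zero at the read pointer: swap it down to the write pointer
      rw [innerA, if_pos (by simp), if_pos ⟨hgi, by rw [hgj]; simpa using hr⟩]
      simp only [hgi, hgj]
      have hset : ((A ++ List.replicate (m'+1) 0 ++ (r :: R')).set A.length r).set
            (A.length + (m'+1)) 0
          = (A ++ [r]) ++ List.replicate (m'+1) 0 ++ R' := by
        rw [List.set_append, if_pos (by simp)]
        rw [List.set_append, if_neg (by simp)]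
        simp only [List.length_set, List.length_append, List.replicate_succ]
        simp [List.append_assoc, zeros_shift]
      simp only [hset]
      have hil : A.length + 1 = (A ++ [r]).length := by simp
      have hjl : A.length + (m'+1) + 1 = (A ++ [r]).length + (m'+1) := by simp; omega
      rw [hil, hjl, ih (A ++ [r]) (m'+1) f (by omega) hf']
      simp [nz, hr]
      omega

theorem zeros_suffix (l : List Int) (i : Nat)
    (h : ∀ k, i ≤ k → k < l.length → l.getD k 0 = 0) :
    l = l.take i ++ List.replicate (l.length - i) 0 := by
  apply List.ext_getElem
  · simp; omega
  · intro k h1 h2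
    by_cases hk : k < i
    · rw [List.getElem_append_left (by simp; omega)]
      simp [List.getElem_take]
    · rw [List.getElem_append_right (by simp; omega)]
      rw [List.getElem_replicate]
      have := h k (by omega) h1
      rwa [List.getD_eq_getElem l 0 h1] at this

theorem compacted_eq_F (l : List Int)
    (h : ∀ p, p < l.length → l.getD p 0 = 0 → ∀ q, p ≤ q → q < l.length → l.getD q 0 = 0) :
    l = Fc l := by
  induction l with
  | nil => rfl
  | cons x t ih =>
    by_cases hx : x = 0
    · subst hx
      have hall : ∀ q, q < (0 :: t).length → (0 :: t).getD q 0 = 0 := by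
        intro q hq
        exact h 0 (by simp) (by simp) q (by omega) hq
      have : (0 :: t) = List.replicate (0 :: t).length 0 := by
        apply List.ext_getElem
        · simp
        · intro k h1 h2
          have := hall k h1
          rw [List.getD_eq_getElem _ 0 h1] at this
          simpa using this
      rw [this]
      unfold Fc
      simp [nz]
    · have ht : t = Fc t := by
        apply ih
        intro p hp hp0 q hpq hq
        have := h (p+1) (by simpa using hp) (by simpa using hp0) (q+1) (by omega) (by simpa using hq)
        simpa using this
      unfold Fc
      simp only [List.filter_cons]
      rw [if_pos (by simp [nz, hx])]
      conv_lhs => rw [ht]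
      unfold Fc
      simp only [List.length_cons, List.cons_append]
      congr 3
      omega

theorem getD_three (A B : List Int) (c p : Nat) :
    (A ++ B ++ List.replicate c (0:Int)).getD p 0 =
      if p < A.length then A.getD p 0
      else if p < A.length + B.length then B.getD (p - A.length) 0
      else 0 := by
  split
  · rw [List.append_assoc, List.getD_append _ _ _ _ (by assumption)]
  · split
    · rw [List.append_assoc, List.getD_append_right _ _ _ _ (by omega)]
      rw [List.getD_append _ _ _ _ (by omega)]
    · by_cases hc : p - (A.length + B.length) < c
      · rw [List.getD_append_right _ _ _ _ (by simp; omega)]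
        simp
      · rw [List.getD_eq_default]
        simp; omega

theorem outer_main (fuel : Nat) : ∀ (l : List Int) (i : Nat), l.length ≤ fuel + i + 1 →
    (∀ p, p < i → p < l.length → l.getD p 0 = 0 → ∀ q, p ≤ q → q < l.length → l.getD q 0 = 0) →
    outerA fuel l i = Fc l := by
  induction fuel with
  | zero =>
    intro l i hfl hinv
    show l = Fc l
    exact compacted_eq_F l (fun p hp hp0 q hpq hq => by
      by_cases h : p < i
      · exact hinv p h hp hp0 q hpq hq
      · have : q = p := by omega
        rw [this]; exact hp0)
  | succ f ih =>
    intro l i hfl hinv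
    rw [outerA]
    by_cases hi : i < l.length - 1
    case neg =>
      rw [if_neg hi]
      exact compacted_eq_F l (fun p hp hp0 q hpq hq => by
        by_cases h : p < i
        · exact hinv p h hp hp0 q hpq hq
        · have : q = p := by omega
          rw [this]; exact hp0)
    case pos =>
      rw [if_pos hi]
      show outerA f (innerA l.length l i (i+1)).1 ((innerA l.length l i (i+1)).2 + 1) = Fc l
      have hilen : i < l.length := by omega
      by_cases hz : l.getD i 0 = 0
      · by_cases hpre : ∃ p, p < i ∧ p < l.length ∧ l.getD p 0 = 0
        · -- an earlier zero: everything from i on is zero already; inner changes nothing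
          obtain ⟨p, hp1, hp2, hp3⟩ := hpre
          have hsuf : ∀ q, p ≤ q → q < l.length → l.getD q 0 = 0 := hinv p hp1 hp2 hp3
          have hdec : l = l.take i ++ List.replicate 1 0 ++ l.drop (i+1) := by
            have h1 : l.take (i+1) = l.take i ++ [l[i]] := List.take_succ_eq_append_getElem hilen
            have h2 : l = l.take (i+1) ++ l.drop (i+1) := (List.take_append_drop (i+1) l).symm
            have h3 : l[i] = 0 := by rw [← List.getD_eq_getElem l 0 hilen]; exact hz
            rw [List.append_assoc]
            nth_rewrite 1 [h2]
            rw [h1, h3]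
            simp
          have hRzero : (l.drop (i+1)).filter nz = [] := by
            apply List.filter_eq_nil_iff.mpr
            intro a ha
            obtain ⟨k, hk, hka⟩ := List.mem_iff_getElem.mp ha
            rw [List.getElem_drop] at hka
            have hz2 := hsuf (i+1+k) (by omega) (by simp at hk; omega)
            rw [List.getD_eq_getElem l 0 (by simp at hk; omega)] at hz2
            rw [hz2] at hka
            simp [nz, ← hka]
          have htl : (l.take i).length = i := by simp; omega
          have hr : innerA l.length l i (i+1) = (l, i) := by
            have h0 := innerA_main (l.drop (i+1)) (l.take i) 1 l.length (le_refl _) (by simp)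
            rw [hRzero] at h0
            rw [htl, ← hdec] at h0
            rw [h0, Prod.mk.injEq]
            constructor
            · simp
              rw [show 1 + (l.length - (i+1)) = l.length - i by omega]
              exact (zeros_suffix l i (fun k hk hkl => hsuf k (by omega) hkl)).symm
            · simp
          rw [hr]
          apply ih l (i+1) (by omega)
          intro p' hp' hpl' hpz' q hq hql
          by_cases hpi : p' < i
          · exact hinv p' hpi hpl' hpz' q hq hql
          · have : p' = i := by omega
            subst this
            exact hsuf q (by omega) hql
        · -- no earlier zero: inner compacts the whole suffix, then nothing changes
          have hall : ∀ p, p < i → p < l.length → l.getD p 0 ≠ 0 :=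
            fun p hp hpl hz0 => hpre ⟨p, hp, hpl, hz0⟩
          have hdec : l = l.take i ++ List.replicate 1 0 ++ l.drop (i+1) := by
            have h1 : l.take (i+1) = l.take i ++ [l[i]] := List.take_succ_eq_append_getElem hilen
            have h2 : l = l.take (i+1) ++ l.drop (i+1) := (List.take_append_drop (i+1) l).symm
            have h3 : l[i] = 0 := by rw [← List.getD_eq_getElem l 0 hilen]; exact hz
            rw [List.append_assoc]
            nth_rewrite 1 [h2]
            rw [h1, h3]
            simp
          have htl : (l.take i).length = i := by simp; omega
          set A := l.take i with hA
          set R := l.drop (i+1) with hR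
          set fR := R.filter nz with hfR
          have hfRlen : fR.length ≤ R.length := List.length_filter_le _ _
          have hRlen : R.length = l.length - (i+1) := by simp [hR]
          set c := 1 + R.length - fR.length with hc
          have hr : innerA l.length l i (i+1) = (A ++ fR ++ List.replicate c 0, i + fR.length) := by
            have h0 := innerA_main R A 1 l.length (le_refl _) (by rw [hRlen]; omega)
            rw [htl, ← hdec] at h0
            rw [h0, hc, hfR]
          have hlen' : (A ++ fR ++ List.replicate c 0).length = l.length := by
            simp [htl, hc]; omega
          have hAnz : ∀ x ∈ A, nz x := by
            intro x hx
            obtain ⟨k, hk, hka⟩ := List.mem_iff_getElem.mp hx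
            have hki : k < i := by simp [hA] at hk; omega
            have hkl : k < l.length := by simp [hA] at hk; omega
            have hnk := hall k hki hkl
            rw [List.getD_eq_getElem l 0 hkl] at hnk
            have hka2 : l[k]'hkl = x := by
              rw [← hka]
              simp [hA, List.getElem_take]
            simp [nz, ← hka2]
            exact hnk
          have hfRnz : ∀ x ∈ fR, nz x := by
            intro x hx
            exact (List.mem_filter.mp hx).2
          rw [hr]
          have ihres := ih (A ++ fR ++ List.replicate c 0) (i + fR.length + 1)
            (by rw [hlen']; omega)
            (by
              intro p' hp' hpl' hpz' q hq hql
              have hp'big : A.length + fR.length ≤ p' := by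
                by_contra hsmall
                push Not at hsmall
                rw [getD_three] at hpz'
                by_cases h1 : p' < A.length
                · rw [if_pos h1] at hpz'
                  have : A.getD p' 0 ∈ A := by
                    rw [List.getD_eq_getElem A 0 (by omega)]
                    exact List.getElem_mem _
                  have := hAnz _ (hpz' ▸ this)
                  simp [nz] at this
                · rw [if_neg h1, if_pos (by omega)] at hpz'
                  have : fR.getD (p' - A.length) 0 ∈ fR := by
                    rw [List.getD_eq_getElem fR 0 (by omega)]
                    exact List.getElem_mem _
                  have := hfRnz _ (hpz' ▸ this)
                  simp [nz] at this
              rw [getD_three, if_neg (by omega), if_neg (by omega)])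
          rw [ihres]
          have hfilter' : (A ++ fR ++ List.replicate c 0).filter nz = A ++ fR := by
            rw [List.filter_append, List.filter_append]
            rw [List.filter_eq_self.mpr hAnz, List.filter_eq_self.mpr hfRnz]
            simp [nz]
          have hfilterl : l.filter nz = A ++ fR := by
            nth_rewrite 1 [hdec]
            rw [List.filter_append, List.filter_append]
            rw [List.filter_eq_self.mpr hAnz]
            simp [nz, hfR]
          unfold Fc
          rw [hfilter', hfilterl, hlen']
      · -- nums[i] non-zero: inner is a no-op
        rw [innerA_noop l i hz l.length (i+1)]
        apply ih l (i+1) (by omega)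
        intro p' hp' hpl' hpz' q hq hql
        by_cases hpi : p' < i
        · exact hinv p' hpi hpl' hpz' q hq hql
        · have : p' = i := by omega
          subst this
          exact absurd hpz' hz

-- ===== VERDICT (by name: the statement is the Claim_ definition above) =====
theorem applyOperations_spec : Claim_equal_applyOperations := by
  intro nums _
  unfold Spec_applyOperations applyOperations applyOperations_alt
  simp only
  rw [phase1_eq_mSpec]
  rw [altGo_eq_goS nums nums.length 0 (by omega)]
  simp only [List.drop_zero]
  rw [outer_main (mSpec nums).length (mSpec nums) 0 (by omega)
      (fun p hp => absurd hp (Nat.not_lt_zero p))]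
  rw [goS_eq_filter_mSpec]
  unfold Fc
  rw [mSpec_length]
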